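-- pv_equiv track=rewrite | github.com/DlutRDService/dlut-research-service | LLMdemo/model/RoBERTaGAT/utils.py | spilt_node
-- ===== SOURCE A (Python) =====
-- def spilt_node(test_data):
--     test_data_split = []
--     flag = 0
--     for index in range(len(test_data)):
--         if index + 1 == len(test_data) or (test_data[index]['label'] == 3 and test_data[index+1]['label'] == 4):
--             test_data_split.append(test_data[flag:index+1])
--             flag = index + 1
--     return test_data_split
-- ===== SOURCE B (Python) =====
-- def spilt_node(test_data):
--     groups = []
--     nxt = None
--     for d in reversed(test_data):
--         if groups and not (d['label'] == 3 and nxt['label'] == 4):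
--             groups[0].insert(0, d)
--         else:
--             groups.insert(0, [d])
--         nxt = d
--     return groups
-- ===== Notes on version B (the rewrite author's own statement) =====
-- stated objective: alternative
-- what changed: B traverses the list once in reverse, carrying the previously seen element, and builds the segments element-by-element back-to-front: each element is either prepended to the current first group or opens a new group when it sits just before a 3->4 boundary, instead of A's forward index loop that appends whole slices between a running flag and the cut index.
import Mathlib
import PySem

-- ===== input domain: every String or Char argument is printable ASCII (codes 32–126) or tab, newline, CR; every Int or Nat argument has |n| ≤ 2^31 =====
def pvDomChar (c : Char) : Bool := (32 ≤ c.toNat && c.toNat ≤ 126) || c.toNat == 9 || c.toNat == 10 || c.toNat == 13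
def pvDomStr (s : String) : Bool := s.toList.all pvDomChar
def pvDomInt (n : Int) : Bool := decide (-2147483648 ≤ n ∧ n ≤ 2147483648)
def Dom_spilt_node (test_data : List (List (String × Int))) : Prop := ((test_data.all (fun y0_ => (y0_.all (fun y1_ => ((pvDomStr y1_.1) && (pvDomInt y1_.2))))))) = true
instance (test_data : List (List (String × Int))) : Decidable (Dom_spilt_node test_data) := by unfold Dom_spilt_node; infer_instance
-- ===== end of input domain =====

-- B replaces A's forward index loop (appending whole slices between a running flag and the cut
-- index) by a single reverse traversal that builds the groups element-by-element, prepending each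
-- element to the current first group or opening a new group at a 3->4 boundary; alternative decomposition, same task.


-- shared helper: d['label'] as a total function (default 0; Pre_ guarantees the key is present wherever either Python evaluates it)
def pyLabel (d : List (String × Int)) : Int := (PySem.Dict.mk d).getD "label" 0

-- shared helper: the boundary condition 'test_data[i]["label"] == 3 and test_data[i+1]["label"] == 4'
def labelCond (test_data : List (List (String × Int))) (i : Int) : Bool :=
  (pyLabel (PySem.List.pyGetD test_data i []) == 3) && (pyLabel (PySem.List.pyGetD test_data (i + 1) []) == 4)

-- ===== PORT A =====
def spilt_node (test_data : List (List (String × Int))) : List (List (List (String × Int))) :=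
  ((PySem.List.pyRange 0 (test_data.length : Int) 1).foldl
    (fun (s : List (List (List (String × Int))) × Int) index =>
      if (index + 1 == (test_data.length : Int)) || labelCond test_data index then
        (s.1 ++ [PySem.List.slice test_data (some s.2) (some (index + 1))], index + 1)
      else s)
    ([], 0)).1

-- ===== PORT B =====
-- one step of B's reverse loop: state = (groups, nxt = previously processed element)
def bstep (s : List (List (List (String × Int))) × Option (List (String × Int)))
    (d : List (String × Int)) :
    List (List (List (String × Int))) × Option (List (String × Int)) :=
  match s.1 with
  | [] => ([[d]], some d)                     -- 'groups' falsy: open a new group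
  | g :: gs =>
    if !((pyLabel d == 3) && (pyLabel (s.2.getD []) == 4)) then
      ((d :: g) :: gs, some d)                -- groups[0].insert(0, d)
    else
      ([d] :: g :: gs, some d)                -- groups.insert(0, [d])

def spilt_node_alt (test_data : List (List (String × Int))) : List (List (List (String × Int))) :=
  (test_data.reverse.foldl bstep ([], none)).1

-- ===== PRECONDITION & SPEC =====
-- Pre_ excludes exactly the inputs where the Python raises KeyError: some element whose 'label'
-- the loop reads (all but the last, plus the successor of a label-3 element) lacks the key.
def Pre_spilt_node (test_data : List (List (String × Int))) : Prop :=
  ∀ i, i < test_data.length - 1 →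
    ((PySem.Dict.mk (test_data.getD i [])).get? "label").isSome = true ∧
    ((PySem.Dict.mk (test_data.getD i [])).get? "label" = some 3 →
      ((PySem.Dict.mk (test_data.getD (i + 1) [])).get? "label").isSome = true)
instance (test_data : List (List (String × Int))) : Decidable (Pre_spilt_node test_data) := by unfold Pre_spilt_node; infer_instance

def pvWitness_spilt_node : (List (List (String × Int))) :=
  [[("label", 3)], [("label", 4)], [("label", 1)]]

def Spec_spilt_node (test_data : List (List (String × Int))) (out : List (List (List (String × Int)))) : Prop := out = spilt_node_alt test_data
instance (test_data : List (List (String × Int))) (out : List (List (List (String × Int)))) : Decidable (Spec_spilt_node test_data out) := by unfold Spec_spilt_node; infer_instance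

-- ===== CLAIM (what is proved, stated in full; the proofs are below) =====
def Claim_equal_spilt_node : Prop := ∀ (test_data : List (List (String × Int))), Dom_spilt_node test_data → Pre_spilt_node test_data → Spec_spilt_node test_data (spilt_node test_data)

-- ===== LEMMAS AND PROOFS =====

-- the sequence of cut points (segment ends) of A's loop, scanning from index a
def cuts (td : List (List (String × Int))) (a : Int) : List Int :=
  if h : (td.length : Int) ≤ a then []
  else if (a + 1 == (td.length : Int)) || labelCond td a then (a + 1) :: cuts td (a + 1)
  else cuts td (a + 1)
termination_by ((td.length : Int) - a).toNat
decreasing_by all_goals omega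

-- the segments A's loop appends, scanning from index a with flag f
def segs (td : List (List (String × Int))) (f a : Int) : List (List (List (String × Int))) :=
  if h : (td.length : Int) ≤ a then []
  else if (a + 1 == (td.length : Int)) || labelCond td a then
    PySem.List.slice td (some f) (some (a + 1)) :: segs td (a + 1) (a + 1)
  else segs td f (a + 1)
termination_by ((td.length : Int) - a).toNat
decreasing_by all_goals omega

lemma loop_eq (td : List (List (String × Int))) :
    ∀ (k : Nat) (a : Int) (acc : List (List (List (String × Int)))) (f : Int),
      (((td.length : Int) - a).toNat = k) →
      ((PySem.List.pyRange a (td.length : Int) 1).foldl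
        (fun (s : List (List (List (String × Int))) × Int) index =>
          if (index + 1 == (td.length : Int)) || labelCond td index then
            (s.1 ++ [PySem.List.slice td (some s.2) (some (index + 1))], index + 1)
          else s)
        (acc, f)).1 = acc ++ segs td f a := by
  intro k
  induction k with
  | zero =>
    intro a acc f hk
    rw [PySem.List.pyRange_one_eq_nil (by omega), segs]
    simp [dif_pos (show (td.length : Int) ≤ a by omega)]
  | succ k ih =>
    intro a acc f hk
    rw [PySem.List.pyRange_one_cons (by omega), List.foldl_cons, segs,
      dif_neg (show ¬ (td.length : Int) ≤ a by omega)]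
    by_cases hc : ((a + 1 == (td.length : Int)) || labelCond td a) = true
    · rw [if_pos hc, if_pos hc, ih (a + 1) _ (a + 1) (by omega), List.append_assoc,
        List.singleton_append]
    · rw [if_neg hc, if_neg hc, ih (a + 1) acc f (by omega)]

lemma segs_eq_zip (td : List (List (String × Int))) :
    ∀ (k : Nat) (a f : Int), (((td.length : Int) - a).toNat = k) →
      segs td f a = ((f :: cuts td a).zip (cuts td a)).map
        (fun p => PySem.List.slice td (some p.1) (some p.2)) := by
  intro k
  induction k with
  | zero =>
    intro a f hk
    rw [segs, cuts]
    simp [dif_pos (show (td.length : Int) ≤ a by omega)]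
  | succ k ih =>
    intro a f hk
    rw [segs, cuts, dif_neg (show ¬ (td.length : Int) ≤ a by omega),
      dif_neg (show ¬ (td.length : Int) ≤ a by omega)]
    by_cases hc : ((a + 1 == (td.length : Int)) || labelCond td a) = true
    · rw [if_pos hc, if_pos hc, ih (a + 1) (a + 1) (by omega)]
      simp [List.zip]
    · rw [if_neg hc, if_neg hc, ih (a + 1) f (by omega)]

lemma cuts_bounds (td : List (List (String × Int))) :
    ∀ (k : Nat) (a : Int), (((td.length : Int) - a).toNat = k) →
      ∀ x ∈ cuts td a, a < x ∧ x ≤ (td.length : Int) := by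
  intro k
  induction k with
  | zero =>
    intro a hk x hx
    rw [cuts, dif_pos (show (td.length : Int) ≤ a by omega)] at hx
    simp at hx
  | succ k ih =>
    intro a hk x hx
    rw [cuts, dif_neg (show ¬ (td.length : Int) ≤ a by omega)] at hx
    by_cases hc : ((a + 1 == (td.length : Int)) || labelCond td a) = true
    · rw [if_pos hc] at hx
      rcases List.mem_cons.mp hx with h | h
      · constructor <;> omega
      · have := ih (a + 1) (by omega) x h; constructor <;> omega
    · rw [if_neg hc] at hx
      have := ih (a + 1) (by omega) x hx; constructor <;> omega

lemma cuts_ne_nil (td : List (List (String × Int))) :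
    ∀ (k : Nat) (a : Int), a < (td.length : Int) → (((td.length : Int) - a).toNat = k) →
      cuts td a ≠ [] := by
  intro k
  induction k with
  | zero => intro a ha hk; omega
  | succ k ih =>
    intro a ha hk
    rw [cuts, dif_neg (show ¬ (td.length : Int) ≤ a by omega)]
    by_cases hc : ((a + 1 == (td.length : Int)) || labelCond td a) = true
    · rw [if_pos hc]; exact List.cons_ne_nil _ _
    · rw [if_neg hc]
      have hne : a + 1 ≠ (td.length : Int) := by
        intro h; rw [h] at hc; simp at hc
      exact ih (a + 1) (by omega) (by omega)

-- xs[a:a+1] = [xs[a]] for a in range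
lemma slice_singleton (td : List (List (String × Int))) (a : Nat) (ha : a < td.length) :
    PySem.List.slice td (some (a : Int)) (some ((a : Int) + 1)) = [td[a]] := by
  have h1 : ((a : Int) + 1) = ((a + 1 : Nat) : Int) := by push_cast; ring
  rw [h1, PySem.List.slice_natCast, List.drop_eq_getElem_cons ha]
  have h2 : a + 1 - a = 1 := by omega
  rw [h2, List.take_succ_cons, List.take_zero]

-- xs[a:c] = xs[a] :: xs[a+1:c] for a < c ≤ len
lemma slice_cons (td : List (List (String × Int))) (a : Nat) (c : Int)
    (hac : (a : Int) < c) (hc : c ≤ (td.length : Int)) :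
    PySem.List.slice td (some (a : Int)) (some c) =
      td[a]'(by omega) :: PySem.List.slice td (some ((a : Int) + 1)) (some c) := by
  have ha : a < td.length := by omega
  have h1 : ((a : Int) + 1) = ((a + 1 : Nat) : Int) := by push_cast; ring
  rw [h1, PySem.List.slice_toNat td (by omega) (by omega),
    PySem.List.slice_toNat td (by omega) (by omega)]
  simp only [Int.toNat_natCast]
  rw [List.drop_eq_getElem_cons ha]
  have h2 : c.toNat - a = (c.toNat - (a + 1)) + 1 := by omega
  rw [h2, List.take_succ_cons]

-- characterisation of B's reverse fold on the suffix td[a:]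
lemma bfold_eq (td : List (List (String × Int))) :
    ∀ (k : Nat) (a : Nat), (td.length - a = k) →
      (td.drop a).foldr (fun d s => bstep s d) ([], none) =
        ((((a : Int) :: cuts td (a : Int)).zip (cuts td (a : Int))).map
          (fun p => PySem.List.slice td (some p.1) (some p.2)),
         (td.drop a).head?) := by
  intro k
  induction k with
  | zero =>
    intro a hk
    have ha : td.length ≤ a := by omega
    rw [List.drop_eq_nil_of_le ha, cuts, dif_pos (by exact_mod_cast Int.ofNat_le.mpr ha)]
    simp
  | succ k ih =>
    intro a hk
    have ha : a < td.length := by omega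
    rw [List.drop_eq_getElem_cons ha, List.foldr_cons, ih (a + 1) (by omega)]
    have hcast : ((a + 1 : Nat) : Int) = (a : Int) + 1 := by push_cast; ring
    by_cases hlast : a + 1 = td.length
    · -- last element: groups empty, open a new group; cut list is [a+1]
      have hcnil : cuts td ((a : Int) + 1) = [] := by
        rw [cuts, dif_pos (by omega)]
      rw [hcast, hcnil]
      rw [cuts, dif_neg (show ¬ (td.length : Int) ≤ (a : Int) by omega),
        if_pos (by simp; omega), hcnil]
      simp only [List.zip_nil_right, List.map_nil, bstep]
      rw [List.zip_cons_cons, List.zip_nil_right, List.map_cons, List.map_nil,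
        slice_singleton td a ha, List.head?_cons]
    · -- not the last: cuts (a+1) is nonempty, head group is td[a+1:c]
      have ha1 : a + 1 < td.length := by omega
      obtain ⟨c, rest, hcr⟩ :=
        List.exists_cons_of_ne_nil
          (cuts_ne_nil td (td.length - (a + 1)) ((a : Int) + 1) (by omega) (by omega))
      have hcb := cuts_bounds td (td.length - (a + 1)) ((a : Int) + 1) (by omega) c
        (by rw [hcr]; exact List.mem_cons_self)
      have hhead : (td.drop (a + 1)).head? = some (td[a + 1]'ha1) := by
        rw [List.drop_eq_getElem_cons ha1]; rfl
      rw [hcast, hcr, hhead]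
      have hga : PySem.List.pyGetD td (a : Int) ([] : List (String × Int)) = td[a]'ha := by
        rw [PySem.List.pyGetD_natCast, List.getD_eq_getElem?_getD]
        simp [List.getElem?_eq_getElem ha]
      have hga1 : PySem.List.pyGetD td ((a : Int) + 1) ([] : List (String × Int)) = td[a + 1]'ha1 := by
        rw [← hcast, PySem.List.pyGetD_natCast, List.getD_eq_getElem?_getD]
        simp [List.getElem?_eq_getElem ha1]
      by_cases hb : labelCond td (a : Int) = true
      · -- boundary: new group [td[a]], cut at a+1
        rw [cuts, dif_neg (show ¬ (td.length : Int) ≤ (a : Int) by omega), if_pos (by simp [hb]),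
          hcr]
        simp only [List.zip_cons_cons, List.map_cons, bstep, Option.getD_some]
        have hbval : ((pyLabel (td[a]'ha) == 3) && (pyLabel (td[a + 1]'ha1) == 4)) = true := by
          rw [← hga, ← hga1]; exact hb
        rw [if_neg (by simp [hbval]), slice_singleton td a ha, List.head?_cons]
      · -- no boundary: prepend td[a] to the head group; same cut list
        rw [cuts, dif_neg (show ¬ (td.length : Int) ≤ (a : Int) by omega),
          if_neg (by simp [hb]; omega), hcr]
        simp only [List.zip_cons_cons, List.map_cons, bstep, Option.getD_some]
        have hbval : ((pyLabel (td[a]'ha) == 3) && (pyLabel (td[a + 1]'ha1) == 4)) = false := by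
          rw [← hga, ← hga1]; exact eq_false_of_ne_true hb
        rw [if_pos (by simp [hbval]), slice_cons td a c (by omega) (by omega), List.head?_cons]

-- ===== VERDICT (by name: the statement is the Claim_ definition above) =====
theorem spilt_node_spec : Claim_equal_spilt_node := by
  intro td _ _
  unfold Spec_spilt_node spilt_node spilt_node_alt
  rw [List.foldl_reverse]
  have hb := bfold_eq td (td.length - 0) 0 rfl
  rw [List.drop_zero] at hb
  rw [hb]
  rw [loop_eq td ((td.length : Int) - 0).toNat 0 [] 0 rfl, List.nil_append,
    segs_eq_zip td ((td.length : Int) - 0).toNat 0 0 rfl]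
  norm_num
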